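-- pv_equiv track=rewrite | github.com/khadafigans/React2Shell | main.py | encode_unicode
-- ===== SOURCE A (Python) =====
-- def encode_unicode(data: str) -> str:
--     """Encode string characters as Unicode escapes for WAF bypass."""
--     result = []
--     in_string = False
--     i = 0
--     while i < len(data):
--         c = data[i]
--         if c == '"':
--             in_string = not in_string
--             result.append(c)
--         elif not in_string:
--             result.append(c)
--         elif c == '\\' and i + 1 < len(data):
--             result.append(c)
--             result.append(data[i + 1])
--             i += 1
--         else:
--             result.append(f"\\u{ord(c):04x}")
--         i += 1
--     return ''.join(result)
-- ===== SOURCE B (Python) =====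
-- def _hex4(c):
--     return "\\u%04x" % ord(c)
--
-- def encode_unicode(data: str) -> str:
--     """Encode string characters as Unicode escapes for WAF bypass."""
--     out = []
--     i, n = 0, len(data)
--     while i < n:
--         # outside a string literal: copy everything up to the next quote verbatim
--         j = data.find('"', i)
--         if j < 0:
--             out.append(data[i:])
--             break
--         out.append(data[i:j])
--         out.append('"')
--         i = j + 1
--         # inside the string literal
--         while i < n:
--             k = i
--             while k < n and data[k] != '"' and data[k] != '\\':
--                 k += 1
--             out.append(''.join(map(_hex4, data[i:k])))
--             if k == n:
--                 i = k
--             elif data[k] == '"':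
--                 out.append('"')
--                 i = k + 1
--                 break
--             elif k + 1 < n:
--                 out.append(data[k:k + 2])
--                 i = k + 2
--             else:
--                 # lone trailing backslash inside an unterminated literal
--                 out.append(_hex4('\\'))
--                 i = n
--     return ''.join(out)
-- ===== Notes on version B (the rewrite author's own statement) =====
-- stated objective: faster
-- what changed: Replaces A's per-character while loop with an in_string boolean state machine by a two-mode chunked scan: outside literals it copies whole slices verbatim up to the next quote (str.find), inside literals it bulk-encodes runs of plain characters and handles quote/escape boundaries explicitly.
import Mathlib
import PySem

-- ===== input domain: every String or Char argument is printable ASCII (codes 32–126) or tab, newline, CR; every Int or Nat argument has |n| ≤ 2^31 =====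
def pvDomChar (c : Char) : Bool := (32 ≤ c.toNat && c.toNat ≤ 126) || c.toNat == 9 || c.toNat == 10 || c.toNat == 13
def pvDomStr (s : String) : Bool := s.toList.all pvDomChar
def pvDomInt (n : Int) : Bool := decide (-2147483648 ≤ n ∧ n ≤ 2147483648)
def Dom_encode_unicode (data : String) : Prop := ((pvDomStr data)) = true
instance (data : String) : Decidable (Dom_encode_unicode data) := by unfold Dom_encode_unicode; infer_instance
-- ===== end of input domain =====

-- B replaces A's per-character in_string state machine by a two-mode chunked scan
-- (verbatim slices outside literals, bulk-encoded runs inside); measurably faster (constant factor).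

-- shared formatting helper: f"\\u{ord(c):04x}" / "\\u%04x" % ord(c)
def pvHexDigit (n : Nat) : Char := if n < 10 then Char.ofNat (48 + n) else Char.ofNat (87 + n)
def pvHex4 (c : Char) : List Char :=
  ['\\', 'u', pvHexDigit (c.toNat / 4096 % 16), pvHexDigit (c.toNat / 256 % 16),
   pvHexDigit (c.toNat / 16 % 16), pvHexDigit (c.toNat % 16)]

-- ===== PORT A =====
-- A's while loop over index i with the in_string flag, transliterated as structural
-- recursion over the remaining characters carrying the same flag.
def pvGoA (cs : List Char) (inStr : Bool) : List Char :=
  match cs with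
  | [] => []
  | c :: rest =>
    if c = '"' then c :: pvGoA rest (!inStr)
    else if !inStr then c :: pvGoA rest inStr
    else if c = '\\' then
      match rest with
      | d :: rest' => c :: d :: pvGoA rest' inStr
      | [] => pvHex4 c ++ pvGoA [] inStr
    else pvHex4 c ++ pvGoA rest inStr

def encode_unicode (data : String) : String := String.ofList (pvGoA data.toList false)

-- ===== PORT B =====
-- B's outer loop (outside a literal; data.find('"') ported as takeWhile/dropWhile) and
-- its inner loop (inside a literal; the k-scan ported likewise), mutually recursive.
mutual
def pvGoOut (cs : List Char) : List Char :=
  let pre := cs.takeWhile (fun c => !(c == '"'))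
  match hm : cs.dropWhile (fun c => !(c == '"')) with
  | [] => pre
  | _ :: r => pre ++ '"' :: pvGoIn r
  termination_by cs.length
  decreasing_by
    have hle' := List.length_dropWhile_le (p := fun c => !(c == '"')) (l := cs)
    rw [hm] at hle'; simp at hle'; omega
def pvGoIn (cs : List Char) : List Char :=
  let enc := ((cs.takeWhile (fun c => !(c == '"') && !(c == '\\'))).map pvHex4).flatten
  match hm : cs.dropWhile (fun c => !(c == '"') && !(c == '\\')) with
  | [] => enc
  | '"' :: r => enc ++ '"' :: pvGoOut r
  | c :: [] => enc ++ pvHex4 c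
  | c :: d :: r => enc ++ c :: d :: pvGoIn r
  termination_by cs.length
  decreasing_by
    all_goals
      have hle' := List.length_dropWhile_le (p := fun c => !(c == '"') && !(c == '\\')) (l := cs)
      rw [hm] at hle'; simp at hle'; omega

end

def encode_unicode_alt (data : String) : String := String.ofList (pvGoOut data.toList)

-- ===== PRECONDITION & SPEC =====
def Spec_encode_unicode (data : String) (out : String) : Prop := out = encode_unicode_alt data
instance (data : String) (out : String) : Decidable (Spec_encode_unicode data out) := by unfold Spec_encode_unicode; infer_instance

-- ===== CLAIM (what is proved, stated in full; the proofs are below) =====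
def Claim_equal_encode_unicode : Prop := ∀ (data : String), Dom_encode_unicode data → Spec_encode_unicode data (encode_unicode data)

-- ===== LEMMAS AND PROOFS =====

theorem pvGoA_nonspec (c : Char) (cs : List Char) (hq : ¬ c = '"') :
    pvGoA (c :: cs) false = c :: pvGoA cs false := by
  rw [pvGoA.eq_def]; simp [hq]

theorem pvGoA_quote (cs : List Char) (b : Bool) :
    pvGoA ('"' :: cs) b = '"' :: pvGoA cs (!b) := by
  rw [pvGoA.eq_def]; simp

theorem pvGoA_in_plain (c : Char) (cs : List Char) (hq : ¬ c = '"') (hb : ¬ c = '\\') :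
    pvGoA (c :: cs) true = pvHex4 c ++ pvGoA cs true := by
  rw [pvGoA.eq_def]; simp [hq, hb]

theorem pvGoA_esc (d : Char) (cs : List Char) :
    pvGoA ('\\' :: d :: cs) true = '\\' :: d :: pvGoA cs true := by
  rw [pvGoA.eq_def]; simp

theorem pvGoOut_eq (cs : List Char) :
    pvGoOut cs = match cs.dropWhile (fun c => !(c == '"')) with
      | [] => cs.takeWhile (fun c => !(c == '"'))
      | _ :: r => cs.takeWhile (fun c => !(c == '"')) ++ '"' :: pvGoIn r := by
  rw [pvGoOut]
  split <;> rename_i heq <;> simp [heq]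

theorem pvGoIn_eq (cs : List Char) :
    pvGoIn cs = match cs.dropWhile (fun c => !(c == '"') && !(c == '\\')) with
      | [] => ((cs.takeWhile (fun c => !(c == '"') && !(c == '\\'))).map pvHex4).flatten
      | '"' :: r => ((cs.takeWhile (fun c => !(c == '"') && !(c == '\\'))).map pvHex4).flatten ++ '"' :: pvGoOut r
      | c :: [] => ((cs.takeWhile (fun c => !(c == '"') && !(c == '\\'))).map pvHex4).flatten ++ pvHex4 c
      | c :: d :: r => ((cs.takeWhile (fun c => !(c == '"') && !(c == '\\'))).map pvHex4).flatten ++ c :: d :: pvGoIn r := by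
  rw [pvGoIn]
  split <;> rename_i heq <;> simp [heq]

theorem pvGoOut_nil : pvGoOut [] = [] := by
  rw [pvGoOut_eq]; simp

theorem pvGoIn_nil : pvGoIn [] = [] := by
  rw [pvGoIn_eq]; simp

theorem pvGoOut_quote (cs : List Char) : pvGoOut ('"' :: cs) = '"' :: pvGoIn cs := by
  rw [pvGoOut_eq]; simp [List.dropWhile_cons]

theorem pvGoOut_other (c : Char) (cs : List Char) (hq : ¬ c = '"') :
    pvGoOut (c :: cs) = c :: pvGoOut cs := by
  rw [pvGoOut_eq, pvGoOut_eq]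
  simp only [List.dropWhile_cons, List.takeWhile_cons]
  cases hdw : cs.dropWhile (fun c => !(c == '"')) with
  | nil => simp [hdw, hq]
  | cons x r => simp [hdw, hq]

theorem pvGoIn_quote (cs : List Char) : pvGoIn ('"' :: cs) = '"' :: pvGoOut cs := by
  rw [pvGoIn_eq]; simp [List.dropWhile_cons, List.takeWhile_cons]

theorem pvGoIn_esc_nil : pvGoIn ['\\'] = pvHex4 '\\' := by
  rw [pvGoIn_eq]; simp [List.dropWhile_cons, List.takeWhile_cons]

theorem pvGoIn_esc (d : Char) (cs : List Char) :
    pvGoIn ('\\' :: d :: cs) = '\\' :: d :: pvGoIn cs := by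
  rw [pvGoIn_eq]; simp [List.dropWhile_cons, List.takeWhile_cons]

theorem pvGoIn_plain (c : Char) (cs : List Char) (hq : ¬ c = '"') (hb : ¬ c = '\\') :
    pvGoIn (c :: cs) = pvHex4 c ++ pvGoIn cs := by
  rw [pvGoIn_eq, pvGoIn_eq]
  simp only [List.dropWhile_cons, List.takeWhile_cons]
  cases hdw : cs.dropWhile (fun c => !(c == '"') && !(c == '\\')) with
  | nil => simp [hdw, hq, hb]
  | cons x r =>
    cases r with
    | nil =>
      cases hx : (x == '"') <;> simp_all [List.append_assoc]
    | cons y r' =>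
      cases hx : (x == '"') <;> simp_all [List.append_assoc]

theorem pvMain : ∀ (n : Nat) (cs : List Char), cs.length ≤ n →
    pvGoA cs false = pvGoOut cs ∧ pvGoA cs true = pvGoIn cs := by
  intro n
  induction n with
  | zero =>
    intro cs h
    have : cs = [] := List.eq_nil_of_length_eq_zero (Nat.le_zero.mp h)
    subst this
    exact ⟨by simp [pvGoA, pvGoOut_nil], by simp [pvGoA, pvGoIn_nil]⟩
  | succ n ih =>
    intro cs h
    match cs with
    | [] => exact ⟨by simp [pvGoA, pvGoOut_nil], by simp [pvGoA, pvGoIn_nil]⟩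
    | c :: cs' =>
      have h' : cs'.length ≤ n := by simpa using h
      constructor
      · by_cases hq : c = '"'
        · subst hq
          rw [pvGoA_quote, pvGoOut_quote]; simpa using (ih cs' h').2
        · rw [pvGoA_nonspec c cs' hq, pvGoOut_other c cs' hq, (ih cs' h').1]
      · by_cases hq : c = '"'
        · subst hq
          rw [pvGoA_quote, pvGoIn_quote]; simpa using (ih cs' h').1
        · by_cases hb : c = '\\'
          · subst hb
            match cs' with
            | [] => rw [pvGoIn_esc_nil, pvGoA.eq_def]; simp [pvGoA]
            | d :: r =>
              have hr : r.length ≤ n := by simp at h'; omega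
              rw [pvGoA_esc, pvGoIn_esc, (ih r hr).2]
          · rw [pvGoA_in_plain c cs' hq hb, pvGoIn_plain c cs' hq hb, (ih cs' h').2]

-- ===== VERDICT (by name: the statement is the Claim_ definition above) =====
theorem encode_unicode_spec : Claim_equal_encode_unicode := by
  intro data _
  unfold Spec_encode_unicode encode_unicode encode_unicode_alt
  exact congrArg String.ofList (pvMain data.toList.length data.toList le_rfl).1
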